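-- pv_equiv track=rewrite | github.com/dvc0310/Interview-prep-stuff | anki/07-25-2023.py | bestTeamScoreRec
-- ===== SOURCE A (Python) =====
-- def bestTeamScoreRec(scores, ages):
--     players = sorted(zip(scores, ages), key=lambda x: (x[1], x[0]))  # sort by age, then by score within the same age
--     memo = {}  # memo[i] is the maximum score of a team that includes player i
--
--     def dp(i):  # dp(i) is the maximum score of a team that includes player i and all previous players
--         if i in memo:
--             return memo[i]  # retrieve the result from memo if it's already computed
--         max_score = players[i][0]  # initialize with the score of player i
--         for j in range(i):
--             if players[i][0] >= players[j][0]:  # no conflict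
--                 max_score = max(max_score, dp(j) + players[i][0])  # include player j and all previous players
--         memo[i] = max_score  # store the result in memo
--         return max_score
--
--     return max(dp(i) for i in range(len(players)))  # compute the maximum score for all teams
-- ===== SOURCE B (Python) =====
-- def bestTeamScoreRec(scores, ages):
--     players = sorted(zip(scores, ages), key=lambda x: (x[1], x[0]))
--     dps = []
--     for s, _ in players:
--         dps.append(s + max([d for d, (t, _) in zip(dps, players) if t <= s] + [0]))
--     return max(dps)
-- ===== Notes on version B (the rewrite author's own statement) =====
-- stated objective: simpler
-- what changed: Replaces A's top-down memoized recursion (nested closure, dict memo, recursive dp calls) with a single bottom-up left-to-right tabulation that appends each player's dp value to a list; the memo dict, closure and recursion disappear (same O(n^2) recurrence, large constant-factor win measured).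
import Mathlib
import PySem

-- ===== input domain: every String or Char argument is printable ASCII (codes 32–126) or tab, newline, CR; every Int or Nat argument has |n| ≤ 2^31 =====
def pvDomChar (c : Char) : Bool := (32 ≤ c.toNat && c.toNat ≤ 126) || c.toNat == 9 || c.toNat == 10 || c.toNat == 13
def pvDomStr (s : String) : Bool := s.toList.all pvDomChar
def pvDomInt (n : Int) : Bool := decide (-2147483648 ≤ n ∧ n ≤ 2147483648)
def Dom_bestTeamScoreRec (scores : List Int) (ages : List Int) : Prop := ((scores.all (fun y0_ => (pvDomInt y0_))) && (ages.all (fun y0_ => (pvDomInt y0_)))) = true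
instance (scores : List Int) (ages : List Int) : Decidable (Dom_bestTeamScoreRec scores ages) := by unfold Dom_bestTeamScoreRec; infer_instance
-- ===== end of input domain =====

-- B replaces A's memoized top-down recursion (closure + dict memo) by a single bottom-up
-- left-to-right tabulation pass appending each dp value to a list: simpler and shorter.


-- shared first line of both Pythons: players = sorted(zip(scores, ages), key=lambda x: (x[1], x[0]))
def pvPlayers (scores ages : List Int) : List (Int × Int) :=
  PySem.List.sorted2 (List.zip scores ages) (fun x => x.2) (fun x => x.1) false

-- players[i][0]; every use site has i < players.length, so getD is exact there
def pvGetP (players : List (Int × Int)) (i : Nat) : Int := (players.getD i (0, 0)).1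

-- ===== PORT A =====
mutual
-- dp(i): memo lookup, else inner loop over j in range(i), then store
def pvDp (players : List (Int × Int)) (i : Nat) (memo : PySem.Dict Int Int) :
    Int × PySem.Dict Int Int :=
  match memo.get? (i : Int) with
  | some v => (v, memo)
  | none =>
      let r := pvDpLoop players i 0 (pvGetP players i) memo
      (r.1, r.2.insert (i : Int) r.1)
termination_by (i, i + 1)
decreasing_by
  all_goals first
    | (apply Prod.Lex.left; omega)
    | (apply Prod.Lex.right; omega)
-- the 'for j in range(i)' loop, threading max_score and the memo
def pvDpLoop (players : List (Int × Int)) (i j : Nat) (ms : Int) (memo : PySem.Dict Int Int) :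
    Int × PySem.Dict Int Int :=
  if h : j < i then
    if pvGetP players i ≥ pvGetP players j then
      let r := pvDp players j memo
      pvDpLoop players i (j + 1) (max ms (r.1 + pvGetP players i)) r.2
    else pvDpLoop players i (j + 1) ms memo
  else (ms, memo)
termination_by (i, i - j)
decreasing_by
  all_goals first
    | (apply Prod.Lex.left; omega)
    | (apply Prod.Lex.right; omega)
end

-- max(dp(i) for i in range(n)): first element dp(0), then fold max, memo threaded through
def pvMaxLoop (players : List (Int × Int)) (n i : Nat) (acc : Int) (memo : PySem.Dict Int Int) : Int :=
  if i < n then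
    let r := pvDp players i memo
    pvMaxLoop players n (i + 1) (max acc r.1) r.2
  else acc
termination_by n - i

def bestTeamScoreRec (scores : List Int) (ages : List Int) : Int :=
  let players := pvPlayers scores ages
  if players.length = 0 then 0  -- Python raises ValueError (max of empty generator); outside Pre_
  else
    let r := pvDp players 0 PySem.Dict.empty
    pvMaxLoop players players.length 1 r.1 r.2

-- ===== PORT B =====
-- max([d for d,(t,_) in zip(dps, players) if t <= s] + [0]); the trailing 0 makes Python's max
-- of that list exactly foldl max 0 over the comprehension
def pvCand (players : List (Int × Int)) (dps : List Int) (s : Int) : Int :=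
  ((((dps.zip players).filter (fun x => x.2.1 ≤ s)).map Prod.fst)).foldl max 0

-- the 'for s, _ in players' loop appending to dps
def pvBGo (players : List (Int × Int)) : List (Int × Int) → List Int → List Int
  | [], dps => dps
  | p :: rest, dps => pvBGo players rest (dps ++ [p.1 + pvCand players dps p.1])

def bestTeamScoreRec_alt (scores : List Int) (ages : List Int) : Int :=
  let players := pvPlayers scores ages
  let dps := pvBGo players players []
  match dps with
  | [] => 0  -- Python raises ValueError (max of empty list); outside Pre_
  | h :: t => t.foldl max h

-- ===== PRECONDITION & SPEC =====
-- Pre_ excludes exactly the inputs where either list is empty: there players is empty and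
-- both A and B raise ValueError (max of an empty sequence).
def Pre_bestTeamScoreRec (scores : List Int) (ages : List Int) : Prop :=
  scores ≠ [] ∧ ages ≠ []
instance (scores : List Int) (ages : List Int) : Decidable (Pre_bestTeamScoreRec scores ages) := by
  unfold Pre_bestTeamScoreRec; infer_instance
def pvWitness_bestTeamScoreRec : List Int × List Int := ([1, 3, 2], [2, 1, 2])

def Spec_bestTeamScoreRec (scores : List Int) (ages : List Int) (out : Int) : Prop :=
  out = bestTeamScoreRec_alt scores ages
instance (scores : List Int) (ages : List Int) (out : Int) :
    Decidable (Spec_bestTeamScoreRec scores ages out) := by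
  unfold Spec_bestTeamScoreRec; infer_instance

-- ===== CLAIM (what is proved, stated in full; the proofs are below) =====
def Claim_equal_bestTeamScoreRec : Prop := ∀ (scores : List Int) (ages : List Int), Dom_bestTeamScoreRec scores ages → Pre_bestTeamScoreRec scores ages → Spec_bestTeamScoreRec scores ages (bestTeamScoreRec scores ages)

-- ===== LEMMAS AND PROOFS =====

-- the pure spec: the list of dp values, built index by index
def pvS (players : List (Int × Int)) : Nat → List Int
  | 0 => []
  | k + 1 =>
      let d := pvS players k
      d ++ [pvGetP players k + pvCand players d (pvGetP players k)]

def pvVal (players : List (Int × Int)) (k : Nat) : Int :=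
  pvGetP players k + pvCand players (pvS players k) (pvGetP players k)

lemma pvS_succ (players : List (Int × Int)) (k : Nat) :
    pvS players (k + 1) = pvS players k ++ [pvVal players k] := rfl

lemma pvS_length (players : List (Int × Int)) (k : Nat) : (pvS players k).length = k := by
  induction k with
  | zero => rfl
  | succ k ih => simp [pvS_succ, ih]

lemma pvS_eq_map (players : List (Int × Int)) (k : Nat) :
    pvS players k = (List.range k).map (pvVal players) := by
  induction k with
  | zero => rfl
  | succ k ih => simp [pvS_succ, List.range_succ, ih]

lemma pvS_getD (players : List (Int × Int)) (i k : Nat) (h : k < i) :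
    (pvS players i).getD k 0 = pvVal players k := by
  rw [pvS_eq_map]
  rw [List.getD_eq_getElem _ _ (by simpa using h)]
  simp

-- fold max over a filtered-mapped list is the fold-with-if
lemma pvFoldFilterMap {α : Type} (l : List α) (c : α → Bool) (g : α → Int) (m0 : Int) :
    (((l.filter c).map g).foldl max m0) =
      l.foldl (fun m x => if c x then max m (g x) else m) m0 := by
  induction l generalizing m0 with
  | nil => rfl
  | cons a l ih =>
      by_cases hc : c a
      · simp [hc, ih]
      · simp [hc, ih]

-- the fold over range i that both sides reduce to
def pvSpecFold (players : List (Int × Int)) (i : Nat) (s : Int) : Int :=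
  (List.range i).foldl (fun m j => if pvGetP players j ≤ s then max m (pvVal players j) else m) 0

lemma pvZip_prefix (players : List (Int × Int)) (i : Nat) (hi : i ≤ players.length) :
    (pvS players i).zip players =
      (List.range i).map (fun j => (pvVal players j, players.getD j (0, 0))) := by
  apply List.ext_getElem
  · simp [pvS_length, Nat.min_eq_left hi]
  · intro j h1 h2
    have hj : j < i := by simpa [pvS_length, Nat.min_eq_left hi] using h1
    have hjp : j < players.length := lt_of_lt_of_le hj hi
    simp only [List.getElem_zip, List.getElem_map, List.getElem_range]
    rw [Prod.mk.injEq]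
    constructor
    · rw [← pvS_getD players i j hj, List.getD_eq_getElem _ _ (by simpa [pvS_length] using hj)]
    · rw [List.getD_eq_getElem _ _ hjp]

lemma pvCand_prefix (players : List (Int × Int)) (i : Nat) (hi : i ≤ players.length) (s : Int) :
    pvCand players (pvS players i) s = pvSpecFold players i s := by
  unfold pvCand pvSpecFold
  rw [pvZip_prefix players i hi]
  rw [List.filter_map, List.map_map, pvFoldFilterMap]
  congr 1
  funext m j
  simp [pvGetP]

-- distribute the '+ s' of A's inner loop out of the fold
lemma pvDistrib (players : List (Int × Int)) (s : Int) (l : List Nat) (x : Int) :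
    l.foldl (fun ms j => if s ≥ pvGetP players j then max ms (pvVal players j + s) else ms) (s + x)
      = s + l.foldl (fun m j => if pvGetP players j ≤ s then max m (pvVal players j) else m) x := by
  induction l generalizing x with
  | nil => rfl
  | cons a l ih =>
      simp only [List.foldl_cons, ge_iff_le]
      by_cases hc : pvGetP players a ≤ s
      · simp only [hc, if_true]
        rw [show max (s + x) (pvVal players a + s) = s + max x (pvVal players a) by
          rcases le_total x (pvVal players a) with h | h
          · rw [max_eq_right h, max_eq_right (by omega)]; omega
          · rw [max_eq_left h, max_eq_left (by omega)]]
        exact ih _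
      · simp only [hc, if_false]
        exact ih _

-- memo invariant: every stored value is the spec value at its (in-range) index
def pvInv (players : List (Int × Int)) (memo : PySem.Dict Int Int) : Prop :=
  ∀ k v, memo.get? k = some v →
    ∃ j : Nat, (j : Int) = k ∧ j < players.length ∧ v = pvVal players j

lemma pvInv_empty (players : List (Int × Int)) : pvInv players PySem.Dict.empty := by
  intro k v h
  simp [PySem.Dict.get?_empty] at h

lemma pvDpLoop_correct (players : List (Int × Int)) (i : Nat) (hi : i < players.length)
    (IH : ∀ j, j < i → ∀ memo, pvInv players memo →
      (pvDp players j memo).1 = pvVal players j ∧ pvInv players (pvDp players j memo).2) :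
    ∀ m j ms memo, j + m = i → pvInv players memo →
      (pvDpLoop players i j ms memo).1 =
        (List.range' j m).foldl
          (fun ms k => if pvGetP players i ≥ pvGetP players k then max ms (pvVal players k + pvGetP players i) else ms) ms ∧
      pvInv players (pvDpLoop players i j ms memo).2 := by
  intro m
  induction m with
  | zero =>
      intro j ms memo hj hInv
      rw [pvDpLoop]
      simp only [show ¬ j < i by omega, dif_neg, not_false_iff]
      simp [hInv]
  | succ m ihm =>
      intro j ms memo hj hInv
      rw [pvDpLoop]
      simp only [show j < i by omega, dif_pos]
      rw [List.range'_succ, List.foldl_cons]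
      by_cases hc : pvGetP players i ≥ pvGetP players j
      · obtain ⟨h1, h2⟩ := IH j (by omega) memo hInv
        simp only [if_pos hc, h1]
        exact ihm (j + 1) _ _ (by omega) h2
      · simp only [if_neg hc]
        exact ihm (j + 1) _ _ (by omega) hInv

lemma pvDp_correct (players : List (Int × Int)) :
    ∀ i, i < players.length → ∀ memo, pvInv players memo →
      (pvDp players i memo).1 = pvVal players i ∧ pvInv players (pvDp players i memo).2 := by
  intro i
  induction i using Nat.strong_induction_on with
  | _ i IH =>
      intro hi memo hInv
      rw [pvDp]
      cases hget : memo.get? (i : Int) with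
      | some v =>
          obtain ⟨j, hji, _, hv⟩ := hInv _ _ hget
          have : j = i := by exact_mod_cast hji
          subst this
          exact ⟨hv, hInv⟩
      | none =>
          have hloop := pvDpLoop_correct players i hi
            (fun j hj memo hm => IH j hj (lt_trans hj hi) memo hm)
            i 0 (pvGetP players i) memo (by omega) hInv
          obtain ⟨h1, h2⟩ := hloop
          have hval : (pvDpLoop players i 0 (pvGetP players i) memo).1 = pvVal players i := by
            rw [h1, ← List.range_eq_range']
            have hd := pvDistrib players (pvGetP players i) (List.range i) 0
            rw [add_zero] at hd
            rw [hd]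
            unfold pvVal
            rw [pvCand_prefix players i (le_of_lt hi)]
            rfl
          refine ⟨hval, ?_⟩
          intro k v hk
          rw [PySem.Dict.get?_insert] at hk
          by_cases hki : k = (i : Int)
          · refine ⟨i, hki.symm, hi, ?_⟩
            simp only [hki, if_true] at hk
            have := hk
            simp only [Option.some.injEq] at this
            rw [← this, hval]
          · simp only [hki, if_false] at hk
            exact h2 _ _ hk

lemma pvMaxLoop_correct (players : List (Int × Int)) (n : Nat) (hn : n = players.length) :
    ∀ m i acc memo, i + m = n → pvInv players memo →
      pvMaxLoop players n i acc memo =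
        (List.range' i m).foldl (fun a j => max a (pvVal players j)) acc := by
  intro m
  induction m with
  | zero =>
      intro i acc memo hi hInv
      rw [pvMaxLoop]
      simp [show ¬ i < n by omega]
  | succ m ihm =>
      intro i acc memo hi hInv
      rw [pvMaxLoop]
      simp only [show i < n by omega, if_true]
      rw [List.range'_succ]
      obtain ⟨h1, h2⟩ := pvDp_correct players i (by omega) memo hInv
      rw [h1, List.foldl_cons]
      exact ihm (i + 1) _ _ (by omega) h2

lemma pvBGo_eq (players : List (Int × Int)) :
    ∀ m k, k + m = players.length →
      pvBGo players (players.drop k) (pvS players k) = pvS players players.length := by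
  intro m
  induction m with
  | zero =>
      intro k hk
      have : players.drop k = [] := by
        apply List.drop_eq_nil_of_le; omega
      rw [this]
      simp only [pvBGo]
      have hkk : k = players.length := by omega
      rw [hkk]
  | succ m ihm =>
      intro k hk
      have hkl : k < players.length := by omega
      rw [List.drop_eq_getElem_cons hkl]
      simp only [pvBGo]
      have hp : players[k].1 + pvCand players (pvS players k) players[k].1 = pvVal players k := by
        unfold pvVal pvGetP
        simp [List.getD_eq_getElem?_getD, List.getElem?_eq_getElem hkl]
      rw [hp, ← pvS_succ]
      exact ihm (k + 1) (by omega)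

-- ===== VERDICT (by name: the statement is the Claim_ definition above) =====
theorem bestTeamScoreRec_spec : Claim_equal_bestTeamScoreRec := by
  unfold Claim_equal_bestTeamScoreRec
  intro scores ages _ hpre
  unfold Spec_bestTeamScoreRec bestTeamScoreRec bestTeamScoreRec_alt
  set players := pvPlayers scores ages with hp
  have hne : players.length ≠ 0 := by
    have hz : (List.zip scores ages).length ≠ 0 := by
      obtain ⟨h1, h2⟩ := hpre
      simp only [List.length_zip]
      rcases scores with _ | ⟨a, s⟩; · exact absurd rfl h1
      rcases ages with _ | ⟨b, t⟩; · exact absurd rfl h2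
      simp
    have hlen : players.length = (List.zip scores ages).length := by
      rw [hp]; unfold pvPlayers
      exact (PySem.List.sorted2_perm _ _ _ _).length_eq
    rw [hlen]; exact hz
  simp only [hne, if_neg, not_false_iff]
  -- B side: dps = pvS players n = map pvVal (range n)
  have hB : pvBGo players players [] = (List.range players.length).map (pvVal players) := by
    have := pvBGo_eq players players.length 0 (by omega)
    simpa [pvS, pvS_eq_map] using this
  rw [hB]
  obtain ⟨n, hn⟩ : ∃ n, players.length = n + 1 := ⟨players.length - 1, by omega⟩
  rw [hn]
  have hrange : List.range (n + 1) = 0 :: List.range' 1 n := by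
    rw [List.range_eq_range', List.range'_succ]
  rw [hrange]
  simp only [List.map_cons]
  -- A side
  obtain ⟨h1, h2⟩ := pvDp_correct players 0 (by omega) PySem.Dict.empty (pvInv_empty players)
  rw [h1, pvMaxLoop_correct players (n + 1) hn.symm n 1 _ _ (by omega) h2]
  rw [List.foldl_map]
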